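-- pv_equiv track=rewrite | github.com/datnhemployee/khuyennghicongtac_15520104 | src/algorithm/content_based/main.py | removeUncommonWord
-- ===== SOURCE A (Python) =====
-- from collections import defaultdict
--
-- def removeUncommonWord(text_corpus):
--     frequency = defaultdict(int)
--     for line in text_corpus:
--         for token in line:
--             frequency[token] += 1
--     texts = [
--         [token for token in text if frequency[token] > 1]
--         for text in text_corpus
--     ]
--     return texts
-- ===== SOURCE B (Python) =====
-- def removeUncommonWord(text_corpus):
--     tokens = sorted(t for line in text_corpus for t in line)
--     repeated = {a for a, b in zip(tokens, tokens[1:]) if a == b}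
--     return [[t for t in text if t in repeated] for text in text_corpus]
-- ===== Notes on version B (the rewrite author's own statement) =====
-- stated objective: alternative
-- what changed: B replaces A's hash-counting pass by a sort-then-adjacent-scan: it flattens and sorts all tokens, declares a token repeated iff it equals its successor in the sorted list, and filters each text by that set.
import Mathlib
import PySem

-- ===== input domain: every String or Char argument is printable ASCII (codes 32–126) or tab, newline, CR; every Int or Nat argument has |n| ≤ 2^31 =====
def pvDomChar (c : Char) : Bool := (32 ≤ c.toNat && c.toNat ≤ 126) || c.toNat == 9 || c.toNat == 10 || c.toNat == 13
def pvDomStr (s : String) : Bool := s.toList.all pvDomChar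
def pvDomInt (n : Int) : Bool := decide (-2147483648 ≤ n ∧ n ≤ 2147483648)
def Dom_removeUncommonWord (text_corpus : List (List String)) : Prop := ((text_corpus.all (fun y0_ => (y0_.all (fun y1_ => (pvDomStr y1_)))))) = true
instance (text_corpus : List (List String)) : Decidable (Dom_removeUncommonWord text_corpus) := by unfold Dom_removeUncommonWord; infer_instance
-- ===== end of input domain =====

-- B replaces A's hash-counting pass by a sort-then-adjacent-scan over the flattened token list; return values proved equal on all inputs.

-- ===== PORT A =====
-- frequency = defaultdict(int); frequency[token] += 1  ≡  d.modify token 0 (· + 1)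
def removeUncommonWord (text_corpus : List (List String)) : List (List String) :=
  let frequency : PySem.Dict String Int :=
    text_corpus.foldl
      (fun d line => line.foldl (fun d token => d.modify token 0 (· + 1)) d)
      PySem.Dict.empty
  text_corpus.map (fun text => text.filter (fun token => decide (frequency.getD token 0 > 1)))

-- ===== PORT B =====
def removeUncommonWord_alt (text_corpus : List (List String)) : List (List String) :=
  -- tokens = sorted(t for line in text_corpus for t in line)
  let tokens := PySem.List.sorted (text_corpus.flatMap (fun line => line)) (fun x => x) false
  -- repeated = {a for a, b in zip(tokens, tokens[1:]) if a == b}   (tokens[1:] = tokens.tail)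
  let repeated : PySem.Set String :=
    PySem.Set.ofList (((tokens.zip tokens.tail).filter (fun p => p.1 == p.2)).map Prod.fst)
  text_corpus.map (fun text => text.filter (fun t => PySem.Set.contains repeated t))

-- ===== PRECONDITION & SPEC =====
def Spec_removeUncommonWord (text_corpus : List (List String)) (out : List (List String)) : Prop := out = removeUncommonWord_alt text_corpus
instance (text_corpus : List (List String)) (out : List (List String)) : Decidable (Spec_removeUncommonWord text_corpus out) := by unfold Spec_removeUncommonWord; infer_instance

-- ===== CLAIM (what is proved, stated in full; the proofs are below) =====
def Claim_equal_removeUncommonWord : Prop := ∀ (text_corpus : List (List String)), Dom_removeUncommonWord text_corpus → Spec_removeUncommonWord text_corpus (removeUncommonWord text_corpus)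

-- ===== LEMMAS AND PROOFS =====

-- in a ≤-sorted list, a token has an equal right neighbour iff it occurs at least twice
lemma mem_adjDups {l : List String} (h : l.Pairwise (· ≤ ·)) (t : String) :
    t ∈ ((l.zip l.tail).filter (fun p => p.1 == p.2)).map Prod.fst ↔ 2 ≤ l.count t := by
  induction l with
  | nil => simp
  | cons a l ih =>
    cases l with
    | nil => simpa using List.count_le_length (l := [a]) (a := t)
    | cons b rest =>
      rw [List.pairwise_cons] at h
      obtain ⟨hhd, hbr⟩ := h
      have hab : a ≤ b := hhd b (List.mem_cons_self ..)
      have harest : ∀ x ∈ rest, a ≤ x := fun x hx => hhd x (List.mem_cons_of_mem _ hx)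
      have hble : ∀ x ∈ rest, b ≤ x := (List.pairwise_cons.mp hbr).1
      have ih' := ih hbr
      simp only [List.tail_cons] at ih'
      simp only [List.tail_cons, List.zip_cons_cons, List.filter_cons, List.count_cons]
      by_cases hEq : a = b
      · subst hEq
        by_cases hta : t = a
        · subst hta
          simp only [beq_self_eq_true, if_pos, List.map_cons, List.mem_cons, true_or, true_iff]
          omega
        · rw [if_pos (by simp)]
          simp only [List.map_cons, List.mem_cons, hta, false_or]
          rw [ih']
          simp [Ne.symm hta]
      · rw [if_neg (by simpa using hEq)]
        rw [ih']
        simp only [List.count_cons]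
        by_cases hta : t = a
        · subst hta
          simp only [beq_self_eq_true, if_pos]
          rw [if_neg (by simpa using fun hh => hEq hh.symm)]
          constructor
          · intro hc; omega
          · intro hc
            have hmem : t ∈ b :: rest := List.one_le_count_iff.mp (by
              simp only [List.count_cons]; omega)
            rcases List.mem_cons.mp hmem with hmb | hmem
            · exact absurd hmb hEq
            · exact absurd (le_antisymm hab (hble t hmem)) hEq
        · simp [Ne.symm hta]

-- A's nested counting fold looks up to the occurrence count in the flattened corpus
lemma freq_eq_count (tc : List (List String)) (t : String) :
    (tc.foldl (fun d line => line.foldl (fun d token => PySem.Dict.modify d token 0 (· + 1)) d)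
        (PySem.Dict.empty : PySem.Dict String Int)).getD t 0 = (tc.flatten.count t : Int) := by
  rw [← List.foldl_flatten]
  simpa using PySem.Dict.getD_foldl_modify_add_one (l := tc.flatten)
    (d := (PySem.Dict.empty : PySem.Dict String Int)) (v := t)

-- ===== VERDICT (by name: the statement is the Claim_ definition above) =====
theorem removeUncommonWord_spec : Claim_equal_removeUncommonWord := by
  intro tc _
  unfold Spec_removeUncommonWord removeUncommonWord removeUncommonWord_alt
  simp only [List.flatMap_id']
  apply List.map_congr_left
  intro text _
  apply List.filter_congr
  intro t _
  rw [freq_eq_count tc t]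
  have hsorted := PySem.List.sorted_pairwise (xs := tc.flatten) (key := fun x : String => x)
  have hmem := mem_adjDups hsorted t
  have hcount : (PySem.List.sorted tc.flatten (fun x => x) false).count t = tc.flatten.count t :=
    (PySem.List.sorted_perm _ _ _).count_eq t
  rw [hcount] at hmem
  by_cases h2 : 2 ≤ tc.flatten.count t
  · rw [(PySem.Set.contains_iff _ t).mpr ((PySem.Set.mem_ofList _ _).mpr (hmem.mpr h2))]
    simpa using by omega
  · have : PySem.Set.contains (PySem.Set.ofList
        (((((PySem.List.sorted tc.flatten (fun x => x) false).zip
            (PySem.List.sorted tc.flatten (fun x => x) false).tail).filter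
          (fun p => p.1 == p.2)).map Prod.fst))) t = false := by
      rcases Bool.eq_false_or_eq_true (PySem.Set.contains _ t) with hb | hb
      · exact absurd (hmem.mp ((PySem.Set.mem_ofList _ _).mp ((PySem.Set.contains_iff _ t).mp hb))) h2
      · exact hb
    rw [this]
    simpa using by omega
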